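-- pv_equiv track=rewrite | github.com/dreibeing/yummi | yummi-server/app/services/filtering.py | _heat_rank
-- ===== SOURCE A (Python) =====
-- from typing import Any, Dict, Iterable, List, Sequence
--
-- HEAT_LEVEL_ORDER = {
--     "NoHeat": 0,
--     "Mild": 1,
--     "Medium": 2,
--     "Hot": 3,
--     "ExtraHot": 4,
-- }
--
-- def _heat_rank(values: Iterable[str] | None) -> int | None:
--     if not values:
--         return None
--     ranks = [HEAT_LEVEL_ORDER.get(value) for value in values if value in HEAT_LEVEL_ORDER]
--     ranks = [rank for rank in ranks if rank is not None]
--     if not ranks: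
--         return None
--     return max(ranks)
-- ===== SOURCE B (Python) =====
-- _HEAT_DESC = [("ExtraHot", 4), ("Hot", 3), ("Medium", 2), ("Mild", 1), ("NoHeat", 0)]
--
-- def _heat_rank(values):
--     if not values:
--         return None
--     present = set(values)
--     for level, rank in _HEAT_DESC:
--         if level in present:
--             return rank
--     return None
-- ===== Notes on version B (the rewrite author's own statement) =====
-- stated objective: alternative
-- what changed: Instead of mapping every value through the heat table and reducing with max, B builds a set of the values once and scans the fixed five heat levels hottest-first, returning the rank of the first level present (early-return loop, no max).
import Mathlib
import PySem

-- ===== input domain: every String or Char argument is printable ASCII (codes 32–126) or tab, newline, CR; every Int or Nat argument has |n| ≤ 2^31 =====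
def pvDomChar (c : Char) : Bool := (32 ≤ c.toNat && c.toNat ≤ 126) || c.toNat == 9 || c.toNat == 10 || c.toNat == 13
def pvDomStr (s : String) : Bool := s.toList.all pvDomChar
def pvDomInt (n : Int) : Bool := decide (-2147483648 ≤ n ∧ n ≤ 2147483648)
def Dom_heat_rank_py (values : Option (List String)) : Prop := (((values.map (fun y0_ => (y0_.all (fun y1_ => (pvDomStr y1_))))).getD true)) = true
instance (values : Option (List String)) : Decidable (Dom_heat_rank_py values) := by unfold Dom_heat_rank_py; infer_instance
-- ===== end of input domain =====

-- B replaces A's map-through-the-table-then-max reduction by a hottest-first scan of the fixed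
-- five-level table with an early return on the first level present in set(values) ("alternative").

-- ===== PORT A =====
def HEAT_LEVEL_ORDER : PySem.Dict String Int :=
  PySem.Dict.ofList [("NoHeat", 0), ("Mild", 1), ("Medium", 2), ("Hot", 3), ("ExtraHot", 4)]

def heat_rank_py (values : Option (List String)) : Option Int :=
  match values with
  | none => none
  | some vs =>
    if vs = [] then none           -- `if not values: return None`
    else
      -- ranks = [HEAT_LEVEL_ORDER.get(value) for value in values if value in HEAT_LEVEL_ORDER]
      let ranks : List (Option Int) :=
        (vs.filter (fun v => HEAT_LEVEL_ORDER.contains v)).map (fun v => HEAT_LEVEL_ORDER.get? v)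
      -- ranks = [rank for rank in ranks if rank is not None]
      let ranks2 : List Int := ranks.filterMap id
      if ranks2 = [] then none     -- `if not ranks: return None`
      else PySem.List.max? ranks2 (fun x => x)   -- `return max(ranks)` (nonempty ⇒ some)

-- ===== PORT B =====
def HEAT_DESC : List (String × Int) :=
  [("ExtraHot", 4), ("Hot", 3), ("Medium", 2), ("Mild", 1), ("NoHeat", 0)]

-- `for level, rank in _HEAT_DESC: if level in present: return rank` / falls off: `return None`
def findRank : List (String × Int) → PySem.Set String → Option Int
  | [], _ => none
  | (l, k) :: rest, present =>
      if PySem.Set.contains present l then some k else findRank rest present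

def heat_rank_py_alt (values : Option (List String)) : Option Int :=
  match values with
  | none => none
  | some vs =>
    if vs = [] then none           -- `if not values: return None`
    else findRank HEAT_DESC (PySem.Set.ofList vs)   -- present = set(values); scan hottest-first

-- ===== PRECONDITION & SPEC =====
def Spec_heat_rank_py (values : Option (List String)) (out : Option Int) : Prop := out = heat_rank_py_alt values
instance (values : Option (List String)) (out : Option Int) : Decidable (Spec_heat_rank_py values out) := by unfold Spec_heat_rank_py; infer_instance

-- ===== CLAIM (what is proved, stated in full; the proofs are below) =====
def Claim_equal_heat_rank_py : Prop := ∀ (values : Option (List String)), Dom_heat_rank_py values → Spec_heat_rank_py values (heat_rank_py values)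

-- ===== LEMMAS AND PROOFS =====

-- which (value, rank) pairs the dict lookup can produce
lemma rank_char (v : String) (m : Int) (h : HEAT_LEVEL_ORDER.get? v = some m) :
    (v = "NoHeat" ∧ m = 0) ∨ (v = "Mild" ∧ m = 1) ∨ (v = "Medium" ∧ m = 2) ∨
    (v = "Hot" ∧ m = 3) ∨ (v = "ExtraHot" ∧ m = 4) := by
  have e : HEAT_LEVEL_ORDER
      = PySem.Dict.mk [("NoHeat", 0), ("Mild", 1), ("Medium", 2), ("Hot", 3), ("ExtraHot", 4)] := by
    rfl
  rw [e] at h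
  simp only [PySem.Dict.get?_mk_cons] at h
  split_ifs at h with a1 a2 a3 a4 a5
  · injection h with h'; exact Or.inl ⟨(eq_of_beq a1).symm, h'.symm⟩
  · injection h with h'; exact Or.inr (Or.inl ⟨(eq_of_beq a2).symm, h'.symm⟩)
  · injection h with h'; exact Or.inr (Or.inr (Or.inl ⟨(eq_of_beq a3).symm, h'.symm⟩))
  · injection h with h'; exact Or.inr (Or.inr (Or.inr (Or.inl ⟨(eq_of_beq a4).symm, h'.symm⟩)))
  · injection h with h'; exact Or.inr (Or.inr (Or.inr (Or.inr ⟨(eq_of_beq a5).symm, h'.symm⟩)))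
  · simp [PySem.Dict.get?] at h

-- A's list `ranks2` is a single filterMap of the lookup
lemma ranks_eq (vs : List String) :
    ((vs.filter (fun v => HEAT_LEVEL_ORDER.contains v)).map
        (fun v => HEAT_LEVEL_ORDER.get? v)).filterMap id
      = vs.filterMap (fun v => HEAT_LEVEL_ORDER.get? v) := by
  induction vs with
  | nil => rfl
  | cons v t ih =>
    by_cases hc : HEAT_LEVEL_ORDER.contains v
    · have hs : (HEAT_LEVEL_ORDER.get? v).isSome := by
        rwa [PySem.Dict.contains_eq_isSome_get?] at hc
      obtain ⟨m, hm⟩ := Option.isSome_iff_exists.mp hs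
      simp only [List.filter_cons, hc, if_true, List.map_cons, List.filterMap_cons, hm, id]
      exact congrArg _ ih
    · have hn : HEAT_LEVEL_ORDER.get? v = none := by
        rw [PySem.Dict.contains_eq_isSome_get?] at hc
        simpa using hc
      simp only [List.filter_cons, List.filterMap_cons, hn]
      simpa [hc] using ih

-- Python max of a list that contains k and is bounded by k
lemma max_eq_of (R : List Int) (k : Int) (hk : k ∈ R) (hub : ∀ m ∈ R, m ≤ k) :
    PySem.List.max? R (fun x => x) = some k := by
  cases h : PySem.List.max? R (fun x => x) with
  | none =>
    rw [PySem.List.max?_eq_none_iff] at h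
    subst h; simp at hk
  | some m =>
    have h1 : k ≤ m := PySem.List.max?_isMax h k hk
    have h3 : m ≤ k := hub m (PySem.List.max?_mem h)
    have : m = k := le_antisymm h3 h1
    rw [this]

-- B's scan, written as a membership case tree over the five levels
lemma findRank_eval (vs : List String) :
    findRank HEAT_DESC (PySem.Set.ofList vs)
      = (if "ExtraHot" ∈ vs then some 4 else if "Hot" ∈ vs then some 3
         else if "Medium" ∈ vs then some 2 else if "Mild" ∈ vs then some 1
         else if "NoHeat" ∈ vs then some 0 else none) := by
  have c : ∀ l : String, PySem.Set.contains (PySem.Set.ofList vs) l = true ↔ l ∈ vs := by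
    intro l; rw [PySem.Set.contains_iff, PySem.Set.mem_ofList]
  simp only [HEAT_DESC, findRank]
  simp only [c]

-- the heart: A's max over looked-up ranks equals B's hottest-first scan
lemma core (vs : List String) :
    PySem.List.max? (vs.filterMap (fun v => HEAT_LEVEL_ORDER.get? v)) (fun x => x)
      = findRank HEAT_DESC (PySem.Set.ofList vs) := by
  rw [findRank_eval]
  have memR : ∀ m : Int, m ∈ vs.filterMap (fun v => HEAT_LEVEL_ORDER.get? v) ↔
      ∃ v ∈ vs, HEAT_LEVEL_ORDER.get? v = some m := by
    intro m; simp [List.mem_filterMap]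
  split_ifs with h1 h2 h3 h4 h5
  · refine max_eq_of _ 4 ((memR 4).mpr ⟨"ExtraHot", h1, by decide⟩) ?_
    intro m hm
    obtain ⟨v, _, hg⟩ := (memR m).mp hm
    rcases rank_char v m hg with ⟨_, h⟩ | ⟨_, h⟩ | ⟨_, h⟩ | ⟨_, h⟩ | ⟨_, h⟩ <;> omega
  · refine max_eq_of _ 3 ((memR 3).mpr ⟨"Hot", h2, by decide⟩) ?_
    intro m hm
    obtain ⟨v, hv, hg⟩ := (memR m).mp hm
    rcases rank_char v m hg with ⟨_, h⟩ | ⟨_, h⟩ | ⟨_, h⟩ | ⟨_, h⟩ | ⟨he, h⟩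
    · omega
    · omega
    · omega
    · omega
    · exact absurd (he ▸ hv) h1
  · refine max_eq_of _ 2 ((memR 2).mpr ⟨"Medium", h3, by decide⟩) ?_
    intro m hm
    obtain ⟨v, hv, hg⟩ := (memR m).mp hm
    rcases rank_char v m hg with ⟨_, h⟩ | ⟨_, h⟩ | ⟨_, h⟩ | ⟨he, h⟩ | ⟨he, h⟩
    · omega
    · omega
    · omega
    · exact absurd (he ▸ hv) h2
    · exact absurd (he ▸ hv) h1
  · refine max_eq_of _ 1 ((memR 1).mpr ⟨"Mild", h4, by decide⟩) ?_
    intro m hm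
    obtain ⟨v, hv, hg⟩ := (memR m).mp hm
    rcases rank_char v m hg with ⟨_, h⟩ | ⟨_, h⟩ | ⟨he, h⟩ | ⟨he, h⟩ | ⟨he, h⟩
    · omega
    · omega
    · exact absurd (he ▸ hv) h3
    · exact absurd (he ▸ hv) h2
    · exact absurd (he ▸ hv) h1
  · refine max_eq_of _ 0 ((memR 0).mpr ⟨"NoHeat", h5, by decide⟩) ?_
    intro m hm
    obtain ⟨v, hv, hg⟩ := (memR m).mp hm
    rcases rank_char v m hg with ⟨_, h⟩ | ⟨he, h⟩ | ⟨he, h⟩ | ⟨he, h⟩ | ⟨he, h⟩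
    · omega
    · exact absurd (he ▸ hv) h4
    · exact absurd (he ▸ hv) h3
    · exact absurd (he ▸ hv) h2
    · exact absurd (he ▸ hv) h1
  · rw [PySem.List.max?_eq_none_iff]
    rw [List.filterMap_eq_nil_iff]
    intro v hv
    cases hg : HEAT_LEVEL_ORDER.get? v with
    | none => rfl
    | some m =>
      exfalso
      rcases rank_char v m hg with ⟨he, _⟩ | ⟨he, _⟩ | ⟨he, _⟩ | ⟨he, _⟩ | ⟨he, _⟩
      · exact absurd (he ▸ hv) h5
      · exact absurd (he ▸ hv) h4
      · exact absurd (he ▸ hv) h3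
      · exact absurd (he ▸ hv) h2
      · exact absurd (he ▸ hv) h1

-- ===== VERDICT (by name: the statement is the Claim_ definition above) =====
theorem heat_rank_py_spec : Claim_equal_heat_rank_py := by
  intro values _
  unfold Spec_heat_rank_py
  cases values with
  | none => rfl
  | some vs =>
    rcases eq_or_ne vs [] with h | h
    · subst h; rfl
    · have hA : heat_rank_py (some vs)
          = (if (((vs.filter (fun v => HEAT_LEVEL_ORDER.contains v)).map
                    (fun v => HEAT_LEVEL_ORDER.get? v)).filterMap id) = [] then none
             else PySem.List.max? (((vs.filter (fun v => HEAT_LEVEL_ORDER.contains v)).map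
                    (fun v => HEAT_LEVEL_ORDER.get? v)).filterMap id) (fun x => x)) := by
        show (if vs = [] then none else _) = _
        rw [if_neg h]
      have hB : heat_rank_py_alt (some vs) = findRank HEAT_DESC (PySem.Set.ofList vs) := by
        show (if vs = [] then none else _) = _
        rw [if_neg h]
      rw [hA, ranks_eq, hB, ← core vs]
      by_cases h2 : vs.filterMap (fun v => HEAT_LEVEL_ORDER.get? v) = []
      · rw [if_pos h2, h2]
        exact ((PySem.List.max?_eq_none_iff [] _).mpr rfl).symm
      · rw [if_neg h2]
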